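-- pv_equiv track=rewrite | github.com/aswinivja/Coding-theory | cyclic_codes.py | crc_encode
-- ===== SOURCE A (Python) =====
-- def crc_encode(data, generator="1011"):
--     """Cyclic Redundancy Check (CRC) Encoding"""
--     data = list(map(int, data))
--     gen = list(map(int, generator))
--     padded = data + [0] * (len(gen)-1)
--
--     for i in range(len(data)):
--         if padded[i] == 1:
--             for j in range(len(gen)):
--                 padded[i+j] ^= gen[j]
--
--     remainder = padded[-(len(gen)-1):]
--     return data + remainder
-- ===== SOURCE B (Python) =====
-- def crc_encode(data, generator="1011"):
--     """Cyclic Redundancy Check (CRC) Encoding via a serial LFSR-style sliding window."""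
--     bits = [int(c) for c in data]
--     gen = [int(c) for c in generator]
--     g = len(gen)
--     if g <= 1:
--         return bits
--     stream = bits + [0] * (g - 1)
--     reg = stream[:g - 1]
--     poly = gen[1:]
--     for x in stream[g - 1:]:
--         cur = reg[0]
--         reg = reg[1:] + [x]
--         if cur == 1:
--             reg = [r ^ v for r, v in zip(reg, poly)]
--     return bits + reg
-- ===== Notes on version B (the rewrite author's own statement) =====
-- stated objective: alternative
-- what changed: B replaces A's in-place long division over the whole padded array (rewriting padded[i..i+g-1] at each step and slicing the remainder off the end) by a serial LFSR-style sliding window: a register of width len(generator)-1 is shifted over the bit stream and XORed with the generator tail whenever the outgoing bit is 1; the register at the end IS the remainder.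
-- intended difference: For generators of length <= 1 (with nonempty data, or data of length >= 2 when the generator is empty) A's slice padded[-(len(gen)-1):] degenerates and A returns the data followed by an accidental (partially XORed) copy of the data; B returns the data with the correct empty remainder of width len(generator)-1 <= 0, which is the intended CRC for a degenerate generator. — e.g. on crc_encode("1", "1"): A returns [1, 0], B returns [1]
import Mathlib
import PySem

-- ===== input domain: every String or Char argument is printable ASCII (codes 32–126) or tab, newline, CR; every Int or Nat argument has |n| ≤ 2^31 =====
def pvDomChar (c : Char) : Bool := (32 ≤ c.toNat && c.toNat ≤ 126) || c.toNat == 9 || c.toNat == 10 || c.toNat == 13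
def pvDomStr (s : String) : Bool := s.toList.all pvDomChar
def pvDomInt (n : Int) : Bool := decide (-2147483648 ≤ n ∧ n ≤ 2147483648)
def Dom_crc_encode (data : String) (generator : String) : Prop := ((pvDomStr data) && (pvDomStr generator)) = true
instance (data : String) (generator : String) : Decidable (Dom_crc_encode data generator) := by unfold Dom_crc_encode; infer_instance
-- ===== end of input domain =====

-- B re-implements CRC encoding as a serial LFSR-style sliding-window register instead of
-- A's in-place long division over the whole padded array (objective: alternative algorithm).

-- ===== PORT A =====
-- int(c) for the single digit characters Pre_ admits (exact there)
def pvDigit (c : Char) : Int := (c.toNat : Int) - 48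

-- inner loop: for j in range(len(gen)): padded[i+j] ^= gen[j]
-- (getD/set are exact here: under Pre_ every touched index is in range, so Python never raises)
def innerA (gen : List Int) (i : Nat) (p : List Int) : List Int :=
  (List.range gen.length).foldl
    (fun q j => q.set (i + j) (PySem.Int.bxor (q.getD (i + j) 0) (gen.getD j 0))) p

-- body of the outer loop over i in range(len(data))
def stepA (gen : List Int) (p : List Int) (i : Nat) : List Int :=
  if p.getD i 0 = 1 then innerA gen i p else p

def crc_encode (data : String) (generator : String) : List Int :=
  let d := data.toList.map pvDigit
  let gen := generator.toList.map pvDigit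
  let padded := d ++ List.replicate ((gen.length : Int) - 1).toNat (0 : Int)
  let final := (List.range d.length).foldl (stepA gen) padded
  d ++ PySem.List.slice final (some (-((gen.length : Int) - 1))) none

-- ===== PORT B =====
-- one LFSR step: shift x in, and if the outgoing bit was 1 XOR the generator tail in
def stepB (poly : List Int) (reg : List Int) (x : Int) : List Int :=
  let cur := reg.headD 0
  let reg' := reg.tail ++ [x]
  if cur = 1 then List.zipWith (fun r v => PySem.Int.bxor r v) reg' poly else reg'

def crc_encode_alt (data : String) (generator : String) : List Int :=
  let bits := data.toList.map pvDigit
  let gen := generator.toList.map pvDigit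
  let g := gen.length
  if g ≤ 1 then bits
  else
    let stream := bits ++ List.replicate (g - 1) (0 : Int)
    let reg := (stream.drop (g - 1)).foldl (stepB gen.tail) (stream.take (g - 1))
    bits ++ reg

-- ===== PRECONDITION & SPEC =====
-- Pre_ admits exactly the inputs where Python's int(c) succeeds on every character:
-- on any non-digit character A raises ValueError.
def Pre_crc_encode (data : String) (generator : String) : Prop :=
  data.toList.all Char.isDigit = true ∧ generator.toList.all Char.isDigit = true
instance (data : String) (generator : String) : Decidable (Pre_crc_encode data generator) := by
  unfold Pre_crc_encode; infer_instance
def pvWitness_crc_encode : String × String := ("1010", "1011")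

-- For generators of length ≤ 1 (with nonempty data, or data of length ≥ 2 when the generator is
-- empty) A's slice padded[-(len(gen)-1):] degenerates and A returns the data followed by an
-- accidental (partially XORed) copy of the data; B returns the data with the correct empty
-- remainder of width len(generator)-1 ≤ 0, the intended CRC for a degenerate generator.
def D_crc_encode (data : String) (generator : String) : Prop :=
  (generator.toList.length = 0 ∧ 2 ≤ data.toList.length) ∨
  (generator.toList.length = 1 ∧ 1 ≤ data.toList.length)
instance (data : String) (generator : String) : Decidable (D_crc_encode data generator) := by
  unfold D_crc_encode; infer_instance

def Spec_crc_encode (data : String) (generator : String) (out : List Int) : Prop :=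
  ¬ D_crc_encode data generator → out = crc_encode_alt data generator
instance (data : String) (generator : String) (out : List Int) :
    Decidable (Spec_crc_encode data generator out) := by unfold Spec_crc_encode; infer_instance

def pvDiffWitness_crc_encode : String × String := ("1", "1")
def pvDiffWitnessOut_crc_encode : (List Int) × (List Int) := ([1, 0], [1])

-- ===== CLAIM (what is proved, stated in full; the proofs are below) =====
def Claim_unchanged_crc_encode : Prop := ∀ (data : String) (generator : String), Dom_crc_encode data generator → Pre_crc_encode data generator → Spec_crc_encode data generator (crc_encode data generator)
def Claim_changed_crc_encode : Prop := Dom_crc_encode (pvDiffWitness_crc_encode.1) (pvDiffWitness_crc_encode.2) ∧ Pre_crc_encode (pvDiffWitness_crc_encode.1) (pvDiffWitness_crc_encode.2) ∧ D_crc_encode (pvDiffWitness_crc_encode.1) (pvDiffWitness_crc_encode.2) ∧ crc_encode (pvDiffWitness_crc_encode.1) (pvDiffWitness_crc_encode.2) = pvDiffWitnessOut_crc_encode.1 ∧ crc_encode_alt (pvDiffWitness_crc_encode.1) (pvDiffWitness_crc_encode.2) = pvDiffWitnessOut_crc_encode.2 ∧ pvDiffWitnessOut_crc_encode.1 ≠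 pvDiffWitnessOut_crc_encode.2
def Claim_exact_crc_encode : Prop := ∀ (data : String) (generator : String), Dom_crc_encode data generator → Pre_crc_encode data generator → D_crc_encode data generator → crc_encode data generator ≠ crc_encode_alt data generator

-- ===== LEMMAS AND PROOFS =====

-- fold over a list as a fold over its indices
theorem foldl_idx {α β : Type} [Inhabited α] (l : List α) (f : β → α → β) (init : β) (d : α) :
    l.foldl f init = (List.range l.length).foldl (fun acc k => f acc (l.getD k d)) init := by
  induction l generalizing init with
  | nil => simp
  | cons a t ih =>
    simp only [List.foldl_cons, List.length_cons, List.range_succ_eq_map, List.foldl_map,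
      List.foldl_cons, List.getD_cons_zero]
    rw [ih (f init a)]
    rfl

-- partial inner loop (proof helper): first t XOR-sets of innerA
def innerAux (gen : List Int) (i : Nat) (t : Nat) (p : List Int) : List Int :=
  (List.range t).foldl
    (fun q j => q.set (i + j) (PySem.Int.bxor (q.getD (i + j) 0) (gen.getD j 0))) p

theorem innerA_eq_aux (gen : List Int) (i : Nat) (p : List Int) :
    innerA gen i p = innerAux gen i gen.length p := rfl

theorem innerAux_succ (gen : List Int) (i t : Nat) (p : List Int) :
    innerAux gen i (t + 1) p
      = (innerAux gen i t p).set (i + t)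
          (PySem.Int.bxor ((innerAux gen i t p).getD (i + t) 0) (gen.getD t 0)) := by
  simp [innerAux, List.range_succ]

theorem innerAux_length (gen : List Int) (i t : Nat) (p : List Int) :
    (innerAux gen i t p).length = p.length := by
  induction t with
  | zero => simp [innerAux]
  | succ t ih =>
    rw [innerAux_succ, List.length_set]
    exact ih

theorem innerAux_getD_out (gen : List Int) (i t : Nat) (p : List Int) (m : Nat)
    (h : m < i ∨ i + t ≤ m) : (innerAux gen i t p).getD m 0 = p.getD m 0 := by
  induction t with
  | zero => simp [innerAux]
  | succ t ih =>
    rw [innerAux_succ]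
    have hne : i + t ≠ m := by omega
    rw [List.getD_eq_getElem?_getD, List.getElem?_set_ne hne, ← List.getD_eq_getElem?_getD]
    exact ih (by omega)

theorem innerAux_getD_in (gen : List Int) (i t : Nat) (p : List Int) (m : Nat)
    (hl : i ≤ m) (hr : m < i + t) (hb : i + t ≤ p.length) :
    (innerAux gen i t p).getD m 0 = PySem.Int.bxor (p.getD m 0) (gen.getD (m - i) 0) := by
  induction t with
  | zero => omega
  | succ t ih =>
    rw [innerAux_succ]
    by_cases hm : m = i + t
    · subst hm
      have hlen : i + t < (innerAux gen i t p).length := by rw [innerAux_length]; omega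
      rw [List.getD_eq_getElem?_getD, List.getElem?_set_self hlen]
      simp only [Option.getD_some]
      rw [innerAux_getD_out gen i t p (i + t) (by omega)]
      have ht : i + t - i = t := by omega
      rw [ht]
    · have hne : i + t ≠ m := fun h => hm h.symm
      rw [List.getD_eq_getElem?_getD, List.getElem?_set_ne hne, ← List.getD_eq_getElem?_getD]
      exact ih (by omega) (by omega)

-- the outer division loop after k steps
def divA (gen : List Int) (s : List Int) (k : Nat) : List Int :=
  (List.range k).foldl (stepA gen) s

theorem divA_length (gen s : List Int) (k : Nat) : (divA gen s k).length = s.length := by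
  induction k with
  | zero => simp [divA]
  | succ k ih =>
    simp only [divA, List.range_succ, List.foldl_append, List.foldl_cons, List.foldl_nil]
    show (stepA gen (divA gen s k) k).length = s.length
    unfold stepA
    split
    · rw [innerA_eq_aux, innerAux_length]; exact ih
    · exact ih

theorem divA_high (gen s : List Int) (k m : Nat) (h : k + gen.length ≤ m + 1) :
    (divA gen s k).getD m 0 = s.getD m 0 := by
  induction k with
  | zero => simp [divA]
  | succ k ih =>
    simp only [divA, List.range_succ, List.foldl_append, List.foldl_cons, List.foldl_nil]
    show (stepA gen (divA gen s k) k).getD m 0 = s.getD m 0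
    unfold stepA
    split
    · rw [innerA_eq_aux, innerAux_getD_out gen k gen.length _ m (by omega)]
      exact ih (by omega)
    · exact ih (by omega)

-- main invariant: B's register after k steps is the window s[k .. k+g-2] of A's array
theorem window_inv (bits gen : List Int) (hg : 2 ≤ gen.length) (k : Nat)
    (hk : k ≤ bits.length) :
    (List.range k).foldl
        (fun reg j => stepB gen.tail reg
          ((bits ++ List.replicate (gen.length - 1) (0 : Int)).getD (j + (gen.length - 1)) 0))
        ((bits ++ List.replicate (gen.length - 1) (0 : Int)).take (gen.length - 1))
      = (List.range (gen.length - 1)).map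
          (fun t => (divA gen (bits ++ List.replicate (gen.length - 1) (0 : Int)) k).getD (k + t) 0) := by
  set g := gen.length with hgdef
  set s := bits ++ List.replicate (g - 1) (0 : Int) with hsdef
  have hslen : s.length = bits.length + (g - 1) := by
    simp [hsdef]
  induction k with
  | zero =>
    simp only [List.range_zero, List.foldl_nil]
    apply List.ext_getElem
    · simp [hslen]
    · intro t h1 h2
      have ht : t < g - 1 := by simp at h2; omega
      simp only [List.getElem_map, List.getElem_range, List.getElem_take]
      show s[t] = (divA gen s 0).getD (0 + t) 0
      rw [show divA gen s 0 = s from rfl, Nat.zero_add,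
        List.getD_eq_getElem s 0 (by omega)]
  | succ k ih =>
    have hk' : k ≤ bits.length := by omega
    have hkn : k < bits.length := by omega
    rw [List.range_succ, List.foldl_append, List.foldl_cons, List.foldl_nil, ih hk']
    have hdlen : (divA gen s k).length = bits.length + (g - 1) := by
      rw [divA_length, hslen]
    -- the shifted register
    have hreg' : ((List.range (g - 1)).map (fun t => (divA gen s k).getD (k + t) 0)).tail
          ++ [s.getD (k + (g - 1)) 0]
        = (List.range (g - 1)).map (fun t => (divA gen s k).getD (k + 1 + t) 0) := by
      apply List.ext_getElem
      · simp; omega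
      · intro t h1 h2
        have ht : t < g - 1 := by simp at h2; omega
        simp only [List.getElem_map, List.getElem_range]
        by_cases htl : t < g - 1 - 1
        · rw [List.getElem_append_left (by simp; omega)]
          rw [List.getElem_tail]
          simp only [List.getElem_map, List.getElem_range]
          congr 1
          omega
        · have hte : t = g - 1 - 1 := by omega
          rw [List.getElem_append_right (by simp; omega), List.getElem_singleton]
          rw [show k + 1 + t = k + (g - 1) from by omega,
            divA_high gen s k (k + (g - 1)) (by omega)]
    have hcur : (((List.range (g - 1)).map (fun t => (divA gen s k).getD (k + t) 0)).headD 0)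
        = (divA gen s k).getD k 0 := by
      rw [show g - 1 = (g - 2) + 1 from by omega, List.range_succ_eq_map]
      simp
    have hstep : divA gen s (k + 1) = stepA gen (divA gen s k) k := by
      simp [divA, List.range_succ]
    unfold stepB
    simp only []
    rw [hcur, hreg']
    by_cases hc : (divA gen s k).getD k 0 = 1
    · rw [if_pos hc]
      have hA : divA gen s (k + 1) = innerA gen k (divA gen s k) := by
        rw [hstep]; unfold stepA; rw [if_pos hc]
      apply List.ext_getElem
      · simp only [List.length_zipWith, List.length_map, List.length_range, List.length_tail]
        omega
      · intro t h1 h2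
        have ht : t < g - 1 := by simp at h2; omega
        rw [List.getElem_zipWith]
        simp only [List.getElem_map, List.getElem_range]
        rw [hA, innerA_eq_aux,
          innerAux_getD_in gen k g (divA gen s k) (k + 1 + t) (by omega) (by omega) (by omega)]
        have hidx : k + 1 + t - k = t + 1 := by omega
        rw [hidx]
        congr 1
        rw [List.getD_eq_getElem gen 0 (by omega), List.getElem_tail]
    · rw [if_neg hc]
      have hA : divA gen s (k + 1) = divA gen s k := by
        rw [hstep]; unfold stepA; rw [if_neg hc]
      rw [hA]

theorem divA_nil (s : List Int) (k : Nat) : divA [] s k = s := by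
  induction k with
  | zero => rfl
  | succ k ih =>
    simp only [divA, List.range_succ, List.foldl_append, List.foldl_cons, List.foldl_nil]
    show stepA [] (divA [] s k) k = s
    unfold stepA innerA
    simp [ih]

-- the two ports agree for every generator of length ≥ 2 (any Int lists)
theorem main_eq (data generator : String) (hg : 2 ≤ generator.toList.length) :
    crc_encode data generator = crc_encode_alt data generator := by
  unfold crc_encode crc_encode_alt
  simp only []
  set bits := data.toList.map pvDigit with hbits
  set gen := generator.toList.map pvDigit with hgen
  have hg2 : 2 ≤ gen.length := by rw [hgen, List.length_map]; exact hg
  rw [if_neg (by omega)]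
  have htn : ((gen.length : Int) - 1).toNat = gen.length - 1 := by omega
  rw [htn]
  set g := gen.length with hgdef
  set stream := bits ++ List.replicate (g - 1) (0 : Int) with hsdef
  have hslen : stream.length = bits.length + (g - 1) := by simp [hsdef]
  congr 1
  -- B side: fold over the dropped stream as a fold over indices
  rw [foldl_idx (stream.drop (g - 1)) (stepB gen.tail) (stream.take (g - 1)) 0]
  have hdl : (stream.drop (g - 1)).length = bits.length := by
    rw [List.length_drop, hslen]; omega
  rw [hdl]
  have hfun : (fun (acc : List Int) (k : Nat) => stepB gen.tail acc ((stream.drop (g - 1)).getD k 0))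
      = (fun (acc : List Int) (j : Nat) => stepB gen.tail acc (stream.getD (j + (g - 1)) 0)) := by
    funext acc j
    congr 1
    rw [List.getD_eq_getElem?_getD, List.getElem?_drop, ← List.getD_eq_getElem?_getD]
    congr 1
    omega
  rw [hfun, window_inv bits gen hg2 bits.length (le_refl _)]
  -- A side: the negative slice is drop bits.length
  have hneg : -((g : Int) - 1) = -(((g - 1 : Nat) : Int)) := by omega
  rw [hneg, PySem.List.slice_from_neg_natCast _ (g - 1) (by omega)]
  rw [show List.foldl (stepA gen) stream (List.range bits.length)
      = divA gen stream bits.length from rfl]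
  have hdlen : (divA gen stream bits.length).length = bits.length + (g - 1) := by
    rw [divA_length, hslen]
  rw [hdlen, show bits.length + (g - 1) - (g - 1) = bits.length from by omega]
  have hdlen2 : (divA gen (bits ++ List.replicate (gen.length - 1) 0) bits.length).length
      = bits.length + (g - 1) := by
    rw [divA_length]
    simp [hgdef]
  apply List.ext_getElem
  · simp only [List.length_drop, List.length_map, List.length_range, hdlen]
    omega
  · intro t h1 h2
    have ht : t < g - 1 := by
      simp only [List.length_map, List.length_range] at h2
      omega
    simp only [List.getElem_map, List.getElem_range, List.getElem_drop]
    rw [List.getD_eq_getElem _ 0 (by omega)]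

-- ===== VERDICT (by name: the statement is the Claim_ definition above) =====
theorem crc_encode_spec : Claim_unchanged_crc_encode := by
  intro data generator _ _ hnD
  unfold D_crc_encode at hnD
  rw [not_or] at hnD
  obtain ⟨hn0, hn1⟩ := hnD
  by_cases hg : 2 ≤ generator.toList.length
  · exact main_eq data generator hg
  · have hcases : generator.toList.length = 0 ∨ generator.toList.length = 1 := by omega
    rcases hcases with h0 | h1
    · -- empty generator: data has at most one character outside D_
      have hd1 : data.toList.length ≤ 1 := by
        by_contra hx; exact hn0 ⟨h0, by omega⟩
      have hge : generator.toList = [] := List.length_eq_zero_iff.mp h0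
      unfold crc_encode crc_encode_alt
      rw [hge]
      simp only [List.map_nil, List.length_nil, Nat.cast_zero]
      rw [if_pos (by omega)]
      rw [show (((0 : Int)) - 1).toNat = 0 from rfl]
      simp only [List.replicate_zero, List.append_nil]
      rw [show (List.range (data.toList.map pvDigit).length).foldl (stepA [])
            (data.toList.map pvDigit) = data.toList.map pvDigit from divA_nil _ _]
      rw [show -((0 : Int) - 1) = (1 : Int) from rfl,
        PySem.List.slice_from _ (by norm_num)]
      rw [show ((1 : Int)).toNat = 1 from rfl]
      rw [List.drop_eq_nil_of_le (by rw [List.length_map]; exact hd1), List.append_nil]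
    · -- generator of length 1: data is empty outside D_
      have hd0 : data.toList = [] := by
        apply List.length_eq_zero_iff.mp
        by_contra hx; exact hn1 ⟨h1, by omega⟩
      obtain ⟨c, hc⟩ := List.length_eq_one_iff.mp h1
      unfold crc_encode crc_encode_alt
      rw [hd0, hc]
      simp only [List.map_nil, List.map_cons, List.length_cons, List.length_nil,
        List.nil_append, List.range_zero, List.foldl_nil, Nat.zero_add, Nat.cast_one]
      rw [if_pos (by omega)]
      rw [show (((1 : Int)) - 1).toNat = 0 from rfl]
      simp only [List.replicate_zero]
      rw [show -((1 : Int) - 1) = (0 : Int) from rfl,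
        PySem.List.slice_from _ (by norm_num)]
      simp

theorem crc_encode_changed : Claim_changed_crc_encode := by
  unfold Claim_changed_crc_encode; decide

theorem crc_encode_tight : Claim_exact_crc_encode := by
  intro data generator _ _ hD heq
  unfold D_crc_encode at hD
  have hlen := congrArg List.length heq
  rcases hD with ⟨h0, hd2⟩ | ⟨h1, hd1⟩
  · -- empty generator, data length ≥ 2: A has length 2n-1, B has length n
    have hge : generator.toList = [] := List.length_eq_zero_iff.mp h0
    unfold crc_encode crc_encode_alt at hlen
    rw [hge] at hlen
    simp only [List.map_nil, List.length_nil, Nat.cast_zero] at hlen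
    rw [if_pos (by omega)] at hlen
    rw [show (((0 : Int)) - 1).toNat = 0 from rfl] at hlen
    simp only [List.replicate_zero, List.append_nil] at hlen
    rw [show (List.range (data.toList.map pvDigit).length).foldl (stepA [])
          (data.toList.map pvDigit) = data.toList.map pvDigit from divA_nil _ _] at hlen
    rw [show -((0 : Int) - 1) = (1 : Int) from rfl,
      PySem.List.slice_from _ (by norm_num)] at hlen
    simp only [List.length_append, List.length_drop, List.length_map] at hlen
    omega
  · -- generator of length 1, nonempty data: A has length 2n, B has length n
    obtain ⟨c, hc⟩ := List.length_eq_one_iff.mp h1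
    unfold crc_encode crc_encode_alt at hlen
    rw [hc] at hlen
    simp only [List.map_cons, List.map_nil, List.length_cons, List.length_nil,
      Nat.zero_add, Nat.cast_one] at hlen
    rw [if_pos (by omega)] at hlen
    rw [show (((1 : Int)) - 1).toNat = 0 from rfl] at hlen
    simp only [List.replicate_zero, List.append_nil] at hlen
    rw [show -((1 : Int) - 1) = (0 : Int) from rfl,
      PySem.List.slice_from _ (by norm_num)] at hlen
    simp only [Int.toNat_zero, List.drop_zero, List.length_append, List.length_map] at hlen
    rw [show List.foldl (stepA [pvDigit c]) (List.map pvDigit data.toList)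
          (List.range data.toList.length)
        = divA [pvDigit c] (List.map pvDigit data.toList) data.toList.length from rfl,
      divA_length, List.length_map] at hlen
    omega
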